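-- pv_equiv track=rewrite | github.com/hasans3/cps_project | OpenDSS_Python_Interface/maptest9bus_test_system.py | maptest9bus_test_system
-- ===== SOURCE A (Python) =====
-- def maptest9bus_test_system(contingency_range):
--     #creating a map for the system
--     import itertools
--     cmb = [];
--     valueset = ['Line.tl48', 'Line.tl49', 'Line.tl85', 'Line.tl96', 'Line.tl57', 'Line.tl67'];
-- #   Generating combinations
-- #    contingency_range = 1;
--     for i in range(0, contingency_range):
--         #comb = [ list(x) for itertools.combinations(valueset, i+1));
--         comb=[];
--         for j in itertools.combinations(valueset, i+1):
--             comb.append(list(j));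
--             #print comb
--         cmb.append(comb);
--     return cmb;
-- ===== SOURCE B (Python) =====
-- def maptest9bus_test_system(contingency_range):
--     valueset = ['Line.tl48', 'Line.tl49', 'Line.tl85', 'Line.tl96', 'Line.tl57', 'Line.tl67']
--     result = []
--     current = [[]]  # index-combinations of the previous size, in lexicographic order
--     for _ in range(contingency_range):
--         nxt = []
--         for c in current:
--             start = c[-1] + 1 if c else 0
--             for j in range(start, 6):
--                 nxt.append(c + [j])
--         result.append([[valueset[j] for j in c] for c in nxt])
--         current = nxt
--     return result
-- ===== Notes on version B (the rewrite author's own statement) =====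
-- stated objective: faster
-- what changed: Replaces itertools.combinations recomputed from scratch at every size with an incremental level-by-level build: each size level extends the previous level's index-combinations with every larger index, so once the levels are exhausted the empty level propagates in O(1) instead of invoking itertools per level.
import Mathlib
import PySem

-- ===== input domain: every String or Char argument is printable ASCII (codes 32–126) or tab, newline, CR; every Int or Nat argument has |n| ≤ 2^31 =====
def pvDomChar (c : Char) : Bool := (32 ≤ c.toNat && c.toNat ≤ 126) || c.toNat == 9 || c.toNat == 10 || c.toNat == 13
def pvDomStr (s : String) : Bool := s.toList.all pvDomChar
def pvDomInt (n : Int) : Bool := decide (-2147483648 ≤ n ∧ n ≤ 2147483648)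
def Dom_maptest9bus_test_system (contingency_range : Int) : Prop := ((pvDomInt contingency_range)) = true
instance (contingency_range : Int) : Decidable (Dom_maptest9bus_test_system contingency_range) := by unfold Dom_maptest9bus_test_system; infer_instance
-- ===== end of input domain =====

-- B builds each size level incrementally by index-extension of the previous level instead of
-- recomputing itertools.combinations from scratch at every size (objective: alternative algorithm).

-- ===== PORT A =====
def pvValueset : List String :=
  ["Line.tl48", "Line.tl49", "Line.tl85", "Line.tl96", "Line.tl57", "Line.tl67"]

-- port of itertools.combinations(xs, k): lexicographic order by index, exact
def pvCombinations : List String → Nat → List (List String)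
  | _, 0 => [[]]
  | [], _+1 => []
  | x :: xs, k+1 => ((pvCombinations xs k).map (fun c => x :: c)) ++ pvCombinations xs (k+1)

def maptest9bus_test_system (contingency_range : Int) : List (List (List String)) :=
  (PySem.List.pyRange 0 contingency_range 1).foldl
    (fun cmb i =>
      let comb := (pvCombinations pvValueset (i + 1).toNat).foldl (fun comb j => comb ++ [j]) []
      cmb ++ [comb]) []

-- ===== PORT B =====
-- valueset[j]; every index built by pvStep is in 0..5, so the .getD "" guard is never taken
def pvDecode (c : List Int) : List String :=
  c.map (fun j => (PySem.List.pyGet? pvValueset j).getD "")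

def pvStep (cs : List (List Int)) : List (List Int) :=
  cs.foldl (fun nxt c =>
    let start : Int := if c.isEmpty then 0 else (PySem.List.pyGet? c (-1)).getD 0 + 1
    (PySem.List.pyRange start 6 1).foldl (fun nxt j => nxt ++ [c ++ [j]]) nxt) []

def maptest9bus_test_system_alt (contingency_range : Int) : List (List (List String)) :=
  ((PySem.List.pyRange 0 contingency_range 1).foldl
    (fun (st : List (List (List String)) × List (List Int)) _ =>
      let nxt := pvStep st.2
      (st.1 ++ [nxt.map pvDecode], nxt)) ([], [[]])).1

-- ===== PRECONDITION & SPEC =====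
def Spec_maptest9bus_test_system (contingency_range : Int) (out : List (List (List String))) : Prop := out = maptest9bus_test_system_alt contingency_range
instance (contingency_range : Int) (out : List (List (List String))) : Decidable (Spec_maptest9bus_test_system contingency_range out) := by unfold Spec_maptest9bus_test_system; infer_instance

-- ===== CLAIM (what is proved, stated in full; the proofs are below) =====
def Claim_equal_maptest9bus_test_system : Prop := ∀ (contingency_range : Int), Dom_maptest9bus_test_system contingency_range → Spec_maptest9bus_test_system contingency_range (maptest9bus_test_system contingency_range)

-- ===== LEMMAS AND PROOFS =====

-- B's level state after k steps
def pvIter : Nat → List (List Int)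
  | 0 => [[]]
  | k+1 => pvStep (pvIter k)

theorem pvStep_nil : pvStep [] = [] := rfl

theorem pvIter_eq_nil (j : Nat) : pvIter (7 + j) = [] := by
  induction j with
  | zero => decide
  | succ j ih =>
      show pvStep (pvIter (7 + j)) = []
      rw [ih]
      exact pvStep_nil

theorem pvCombinations_nil_of_lt : ∀ (xs : List String) (k : Nat), xs.length < k → pvCombinations xs k = [] := by
  intro xs
  induction xs with
  | nil => intro k hk; cases k with
      | zero => omega
      | succ k => rfl
  | cons x xs ih =>
      intro k hk
      cases k with
      | zero => omega
      | succ k =>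
          simp only [pvCombinations]
          rw [ih k (by simpa using hk), ih (k+1) (by simp at hk ⊢; omega)]
          rfl

-- B's decoded level k equals A's combinations of size k
theorem pvLevel_eq (k : Nat) : (pvIter k).map pvDecode = pvCombinations pvValueset k := by
  by_cases h : k < 7
  · revert h
    revert k
    decide
  · obtain ⟨j, rfl⟩ : ∃ j, k = 7 + j := ⟨k - 7, by omega⟩
    rw [pvIter_eq_nil, pvCombinations_nil_of_lt]
    · rfl
    · show 6 < 7 + j; omega

-- A's fold over [0,…,m-1] produces the list of combination groups
theorem pvA_fold (m : Nat) :
    ((List.range m).map (fun k : Nat => (0:Int) + (k:Int))).foldl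
      (fun cmb i =>
        let comb := (pvCombinations pvValueset (i + 1).toNat).foldl (fun comb j => comb ++ [j]) []
        cmb ++ [comb]) []
    = (List.range m).map (fun k => pvCombinations pvValueset (k+1)) := by
  induction m with
  | zero => rfl
  | succ m ih =>
      rw [List.range_succ, List.map_append, List.foldl_append, ih, List.map_append]
      simp only [List.map_cons, List.map_nil, List.foldl_cons, List.foldl_nil,
        PySem.List.foldl_append_singleton]
      have h : ((0:Int) + (m:Int) + 1).toNat = m + 1 := by omega
      rw [h, List.nil_append]

-- B's fold over m steps: output groups are the decoded levels, state is level m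
theorem pvB_fold (m : Nat) :
    ((List.range m).map (fun k : Nat => (0:Int) + (k:Int))).foldl
      (fun (st : List (List (List String)) × List (List Int)) _ =>
        let nxt := pvStep st.2
        (st.1 ++ [nxt.map pvDecode], nxt)) ([], [[]])
    = ((List.range m).map (fun k => (pvIter (k+1)).map pvDecode), pvIter m) := by
  induction m with
  | zero => rfl
  | succ m ih =>
      rw [List.range_succ, List.map_append, List.foldl_append, ih, List.map_append]
      rfl

-- ===== VERDICT (by name: the statement is the Claim_ definition above) =====
theorem maptest9bus_test_system_spec : Claim_equal_maptest9bus_test_system := by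
  intro n _
  show maptest9bus_test_system n = maptest9bus_test_system_alt n
  unfold maptest9bus_test_system maptest9bus_test_system_alt
  rw [PySem.List.pyRange_one]
  rw [pvA_fold, pvB_fold]
  simp only []
  apply List.map_congr_left
  intro k _
  rw [pvLevel_eq]
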